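-- pv_equiv track=rewrite | github.com/dhanrajsinh24/python_tango_puzzle_game | src/game_board.py | has_three_adjacent
-- ===== SOURCE A (Python) =====
-- def has_three_adjacent(cell_list):
--     last_cell = cell_list[0]
--     count = 1
--
--     for i in range(1, len(cell_list)):
--         cell = cell_list[i]
--         if cell is None:
--             count = 0  # Reset count when encountering None
--             continue
--         if cell == last_cell:
--             count += 1
--         else:
--             count = 1
--             last_cell = cell
--         if count >= 3:
--             return True
--     return False
-- ===== SOURCE B (Python) =====
-- def has_three_adjacent(cell_list):
--     # Windowed check: three consecutive equal non-None cells.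
--     # Returns False on [] where the original raises IndexError (stated in Pre_/Raises_).
--     return any(a is not None and a == b == c
--                for a, b, c in zip(cell_list, cell_list[1:], cell_list[2:]))
-- ===== Notes on version B (the rewrite author's own statement) =====
-- stated objective: idiomatic
-- what changed: Replaced the running counter/last-cell state machine by a stateless sliding-window any() over zipped triples of consecutive cells.
import Mathlib
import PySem

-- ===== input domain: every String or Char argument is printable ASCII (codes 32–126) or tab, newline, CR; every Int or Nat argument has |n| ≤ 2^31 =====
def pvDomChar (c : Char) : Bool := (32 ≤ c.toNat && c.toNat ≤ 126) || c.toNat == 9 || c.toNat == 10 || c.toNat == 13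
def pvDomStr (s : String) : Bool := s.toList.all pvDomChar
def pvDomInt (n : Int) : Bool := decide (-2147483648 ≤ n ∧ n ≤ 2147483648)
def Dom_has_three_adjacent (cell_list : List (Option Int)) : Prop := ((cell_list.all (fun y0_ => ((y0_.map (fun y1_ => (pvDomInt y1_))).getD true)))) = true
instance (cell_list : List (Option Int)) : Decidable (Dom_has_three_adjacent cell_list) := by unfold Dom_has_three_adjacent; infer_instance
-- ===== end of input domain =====

-- B replaces A's running last_cell/count state machine by a stateless sliding-window
-- any() over zipped triples of consecutive cells (idiomatic; same cost); on [] A raises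
-- IndexError while B returns False (excluded by Pre_).

-- ===== PORT A =====
-- the 'for i in range(1, len(cell_list))' loop of A, carrying (last_cell, count)
def loopA : List (Option Int) → Option Int → Int → Bool
  | [], _, _ => false
  | cell :: rest, last_cell, count =>
    match cell with
    | none => loopA rest last_cell 0      -- count = 0; continue
    | some v =>
      -- count/last_cell update, then the 'if count >= 3: return True' check
      let s : Int × Option Int := if (some v : Option Int) == last_cell
                                  then (count + 1, last_cell) else (1, some v)
      if s.1 ≥ 3 then true else loopA rest s.2 s.1

def has_three_adjacent (cell_list : List (Option Int)) : Bool :=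
  match cell_list with
  | [] => false                -- Python raises IndexError at cell_list[0]; outside Pre_
  | first :: rest => loopA rest first 1

-- ===== PORT B =====
-- cell_list[1:] / cell_list[2:] are List.drop 1 / drop 2 (exact for nonnegative slice starts)
def has_three_adjacent_alt (cell_list : List (Option Int)) : Bool :=
  (cell_list.zip ((cell_list.drop 1).zip (cell_list.drop 2))).any
    (fun x => x.1.isSome && x.1 == x.2.1 && x.2.1 == x.2.2)

-- ===== PRECONDITION & SPEC =====
-- Pre_ excludes only the empty list, on which A raises IndexError.
def Pre_has_three_adjacent (cell_list : List (Option Int)) : Prop := cell_list ≠ []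
instance (cell_list : List (Option Int)) : Decidable (Pre_has_three_adjacent cell_list) := by unfold Pre_has_three_adjacent; infer_instance
def pvWitness_has_three_adjacent : List (Option Int) := [some 1, some 1, none]

def Spec_has_three_adjacent (cell_list : List (Option Int)) (out : Bool) : Prop := out = has_three_adjacent_alt cell_list
instance (cell_list : List (Option Int)) (out : Bool) : Decidable (Spec_has_three_adjacent cell_list out) := by unfold Spec_has_three_adjacent; infer_instance

-- ===== CLAIM =====
def Claim_equal_has_three_adjacent : Prop := ∀ (cell_list : List (Option Int)), Dom_has_three_adjacent cell_list → Pre_has_three_adjacent cell_list → Spec_has_three_adjacent cell_list (has_three_adjacent cell_list)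

-- ===== LEMMAS AND PROOFS =====
-- sliding-window check as a plain recursion (proof-side restatement of B)
def tri : List (Option Int) → Bool
  | a :: rest@(b :: c :: _) => (a.isSome && a == b && b == c) || tri rest
  | _ => false

lemma alt_eq_tri (l : List (Option Int)) : has_three_adjacent_alt l = tri l := by
  unfold has_three_adjacent_alt
  induction l using tri.induct with
  | case1 a b c t ih =>
    simp only [List.drop, List.zip_cons_cons, List.any_cons, tri]
    rw [← ih]
    rfl
  | case2 l h =>
    rcases l with _ | ⟨a, _ | ⟨b, _ | ⟨c, t⟩⟩⟩
    · simp [tri]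
    · simp [tri]
    · simp [tri]
    · exact (h a b c t rfl).elim

lemma tri_skip (a : Option Int) (t : List (Option Int))
    (h : ∀ b c t', t = b :: c :: t' → (a.isSome && a == b && b == c) = false) :
    tri (a :: t) = tri t := by
  match t with
  | [] => simp [tri]
  | [x] => simp [tri]
  | b :: c :: t' => simp [tri, h b c t' rfl]

lemma window_none_mid (a c : Option Int) : (a.isSome && a == (none : Option Int) && ((none : Option Int) == c)) = false := by
  cases a <;> simp

lemma window_last_none (a b : Option Int) : (a.isSome && a == b && b == (none : Option Int)) = false := by
  cases b <;> simp [Bool.and_comm]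

lemma window_neq (a b c : Option Int) (h : a ≠ b) : (a.isSome && a == b && b == c) = false := by
  simp [h]

lemma window_third_neq (a b : Option Int) (h : a ≠ b) : (a.isSome && a == a && a == b) = false := by
  simp [h]

lemma loopA_eq (rest : List (Option Int)) : ∀ (last : Option Int) (count : Int),
    0 ≤ count → count ≤ 2 → (count = 2 → last ≠ none) →
    loopA rest last count = tri (List.replicate count.toNat last ++ rest) := by
  induction rest with
  | nil =>
    intro last count h0 h2 _
    interval_cases count <;> simp [loopA, tri]
  | cons c t ih =>
    intro last count h0 h2 hl
    cases c with
    | none =>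
      have lhs : loopA (none :: t) last count = tri t := by
        rw [show loopA (none :: t) last count = loopA t last 0 from rfl,
            ih last 0 (by omega) (by omega) (by omega)]
        rfl
      rw [lhs]
      have skipn : tri ((none : Option Int) :: t) = tri t :=
        tri_skip _ _ (fun b c t' _ => by simp)
      interval_cases count
      · simpa using skipn.symm
      · rw [show ((1:Int)).toNat = 1 from rfl]
        simp only [List.replicate, List.cons_append, List.nil_append]
        rw [tri_skip last (none :: t)
            (fun b c t' hEq => by
              cases hEq; exact window_none_mid _ _), skipn]
      · have hlast : last ≠ none := hl rfl
        rw [show ((2:Int)).toNat = 2 from rfl]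
        simp only [List.replicate, List.cons_append, List.nil_append]
        rw [tri_skip last (last :: none :: t)
            (fun b c t' hEq => by
              cases hEq; exact window_last_none _ _),
           tri_skip last (none :: t)
            (fun b c t' hEq => by
              cases hEq; exact window_none_mid _ _), skipn]
    | some v =>
      by_cases heq : (some v : Option Int) = last
      · subst heq
        by_cases h3 : count + 1 ≥ 3
        · have hc : count = 2 := by omega
          subst hc
        -- LHS returns true; RHS's first window is (some v, some v, some v)
          simp [loopA, tri]
        · have hc1 : count ≤ 1 := by omega
          have lhs : loopA (some v :: t) (some v) count = loopA t (some v) (count + 1) := by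
            simp [loopA]
            omega
          rw [lhs, ih (some v) (count + 1) (by omega) (by omega) (fun _ => by simp)]
          have hnat : (count + 1).toNat = count.toNat + 1 := by omega
          rw [hnat, List.replicate_succ']
          simp
      · have hbeq : ((some v : Option Int) == last) = false := by
          simp [heq]
        have lhs : loopA (some v :: t) last count = loopA t (some v) 1 := by
          simp [loopA, hbeq]
        rw [lhs, ih (some v) 1 (by omega) (by omega) (by omega),
            show ((1:Int)).toNat = 1 from rfl]
        simp only [List.replicate, List.cons_append, List.nil_append]
        have hne : last ≠ some v := fun h => heq h.symm
        interval_cases count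
        · rfl
        · rw [show ((1:Int)).toNat = 1 from rfl]
          simp only [List.replicate, List.cons_append, List.nil_append]
          rw [tri_skip last (some v :: t)
            (fun b c t' hEq => by cases hEq; exact window_neq _ _ _ hne)]
        · rw [show ((2:Int)).toNat = 2 from rfl]
          simp only [List.replicate, List.cons_append, List.nil_append]
          rw [tri_skip last (last :: some v :: t)
              (fun b c t' hEq => by cases hEq; exact window_third_neq _ _ hne),
             tri_skip last (some v :: t)
            (fun b c t' hEq => by cases hEq; exact window_neq _ _ _ hne)]

-- ===== VERDICT =====
theorem has_three_adjacent_spec : Claim_equal_has_three_adjacent := by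
  intro l _ hpre
  unfold Spec_has_three_adjacent
  rw [alt_eq_tri]
  match l, hpre with
  | first :: rest, _ =>
    rw [show has_three_adjacent (first :: rest) = loopA rest first 1 from rfl,
        loopA_eq rest first 1 (by omega) (by omega) (by omega)]
    rfl
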